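-- pv_equiv track=rewrite | github.com/PlinioRPereira/uartDecoder | decoder.py | autoThresholdBinarization
-- ===== SOURCE A (Python) =====
-- def autoThresholdBinarization(samples, windowSize):
--     binary_array = []
--
--     for i in range(0, len(samples), windowSize):
--         window = samples[i:i+windowSize]
--         threshold = (max(window) + min(window)) / 2
--
--         binarized_window = [1 if sample >= threshold else 0 for sample in window]
--         binary_array.extend(binarized_window)
--
--     return binary_array
-- ===== SOURCE B (Python) =====
-- def autoThresholdBinarization(samples, windowSize):
--     # First pass: one threshold per window.  Second pass: a single flat
--     # indexed sweep over all samples.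
--     thresholds = []
--     for i in range(0, len(samples), windowSize):
--         window = samples[i:i + windowSize]
--         thresholds.append((max(window) + min(window)) / 2)
--     return [1 if s >= thresholds[i // windowSize] else 0
--             for i, s in enumerate(samples)]
-- ===== Notes on version B (the rewrite author's own statement) =====
-- stated objective: alternative
-- what changed: A interleaves threshold computation with emitting each binarized window; B first builds a thresholds table (one entry per window) and then emits the result in a single flat pass over enumerate(samples), indexing the table with i // windowSize.
-- outside the precondition, e.g. on autoThresholdBinarization([1, 2], -1): A returns [], B raises IndexError
import Mathlib
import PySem

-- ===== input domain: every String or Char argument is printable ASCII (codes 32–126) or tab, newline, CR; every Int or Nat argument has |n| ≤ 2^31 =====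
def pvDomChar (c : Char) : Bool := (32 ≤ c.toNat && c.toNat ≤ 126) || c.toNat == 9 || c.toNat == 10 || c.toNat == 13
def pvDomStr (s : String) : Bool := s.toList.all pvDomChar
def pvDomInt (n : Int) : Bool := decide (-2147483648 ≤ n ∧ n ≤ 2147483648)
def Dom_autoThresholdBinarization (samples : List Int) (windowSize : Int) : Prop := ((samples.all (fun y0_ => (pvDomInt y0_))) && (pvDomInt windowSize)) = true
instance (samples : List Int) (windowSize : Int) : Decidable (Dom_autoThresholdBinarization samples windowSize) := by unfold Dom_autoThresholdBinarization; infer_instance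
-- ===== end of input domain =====

-- B replaces A's interleaved compute-threshold-and-extend loop by a thresholds table
-- built in a first pass plus one flat indexed sweep over enumerate(samples) (objective: alternative).


-- ===== PORT A =====
-- Python's threshold is (max+min)/2, a float; on the stated domain (|v| ≤ 2^31) that
-- division is exact, so 'sample >= threshold' is ported exactly as 'max+min ≤ 2*sample'.
-- max()/min() on an empty window raise ValueError (the 'none' match arm); windowSize = 0
-- raises ValueError in range(); both are excluded by Pre_.
def autoThresholdBinarization (samples : List Int) (windowSize : Int) : List Int :=
  (PySem.List.pyRange 0 samples.length windowSize).foldl (fun acc i =>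
    let window := PySem.List.slice samples (some i) (some (i + windowSize))
    match PySem.List.max? window (fun y => y), PySem.List.min? window (fun y => y) with
    | some mx, some mn => acc ++ window.map (fun s => if mx + mn ≤ 2 * s then (1 : Int) else 0)
    | _, _ => acc) []

-- ===== PORT B =====
-- (max(window)+min(window))/2 stored per window; same exact-halving port, so the table
-- holds 2*threshold = max+min (0 for the unreachable empty window, where Python raises).
def pvThresh2 (window : List Int) : Int :=
  (PySem.List.max? window (fun y => y)).getD 0 + (PySem.List.min? window (fun y => y)).getD 0

def autoThresholdBinarization_alt (samples : List Int) (windowSize : Int) : List Int :=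
  let thresholds := (PySem.List.pyRange 0 samples.length windowSize).map
    (fun i => pvThresh2 (PySem.List.slice samples (some i) (some (i + windowSize))))
  (PySem.List.enumerate samples 0).map (fun p =>
    if PySem.List.pyGetD thresholds (PySem.Int.floordiv p.1 windowSize) 0 ≤ 2 * p.2 then (1 : Int) else 0)

-- ===== PRECONDITION & SPEC =====
-- windowSize = 0 makes A raise ValueError (range step 0).  Pre_ also excludes negative
-- windowSize, on which A's range() silently yields no windows and A returns [] while B's
-- thresholds[i // windowSize] index pass raises IndexError on nonempty samples.
def Pre_autoThresholdBinarization (samples : List Int) (windowSize : Int) : Prop := 0 < windowSize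
instance (samples : List Int) (windowSize : Int) : Decidable (Pre_autoThresholdBinarization samples windowSize) := by unfold Pre_autoThresholdBinarization; infer_instance
def pvWitness_autoThresholdBinarization : List Int × Int := ([1, 5, 3], 2)

def Spec_autoThresholdBinarization (samples : List Int) (windowSize : Int) (out : List Int) : Prop := out = autoThresholdBinarization_alt samples windowSize
instance (samples : List Int) (windowSize : Int) (out : List Int) : Decidable (Spec_autoThresholdBinarization samples windowSize out) := by unfold Spec_autoThresholdBinarization; infer_instance

-- ===== CLAIM (what is proved, stated in full; the proofs are below) =====
def Claim_equal_autoThresholdBinarization : Prop := ∀ (samples : List Int) (windowSize : Int), Dom_autoThresholdBinarization samples windowSize → Pre_autoThresholdBinarization samples windowSize → Spec_autoThresholdBinarization samples windowSize (autoThresholdBinarization samples windowSize)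

-- ===== LEMMAS AND PROOFS =====

-- proof-side reference recursion: window size is wpred+1 (so positivity is structural)
def pvRef (wpred : Nat) : List Int → List Int
  | [] => []
  | x :: xs =>
      (match PySem.List.max? ((x :: xs).take (wpred + 1)) (fun y => y),
             PySem.List.min? ((x :: xs).take (wpred + 1)) (fun y => y) with
       | some mx, some mn =>
           ((x :: xs).take (wpred + 1)).map (fun s => if mx + mn ≤ 2 * s then (1 : Int) else 0)
       | _, _ => []) ++ pvRef wpred ((x :: xs).drop (wpred + 1))
termination_by l => l.length
decreasing_by simp

lemma pvRange_nil {w : Int} (hw : 0 < w) {b : Int} (hb : b ≤ 0) :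
    PySem.List.pyRange 0 b w = [] := by
  rw [PySem.List.pyRange_of_pos _ _ hw]
  simp [show ¬ ((0:Int) < b) by omega]

lemma pvRange_peel {w : Int} (hw : 0 < w) {b : Int} (hb : 0 < b) :
    PySem.List.pyRange 0 b w = 0 :: (PySem.List.pyRange 0 (b - w) w).map (fun j => j + w) := by
  rw [PySem.List.pyRange_of_pos _ _ hw, PySem.List.pyRange_of_pos _ _ hw]
  by_cases h : w < b
  · have hK : ((b - 0 + w - 1) / w).toNat = ((b - w - 0 + w - 1) / w).toNat + 1 := by
      have he : b - 0 + w - 1 = (b - w - 0 + w - 1) + 1 * w := by ring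
      rw [he, Int.add_mul_ediv_right _ _ (by omega)]
      have h1 : 0 ≤ (b - w - 0 + w - 1) / w := Int.ediv_nonneg (by omega) (by omega)
      omega
    simp only [hb, if_pos]
    rw [hK, List.range_succ_eq_map]
    simp only [List.map_cons, List.map_map]
    congr 1
    · simp
    rw [if_pos (show (0:Int) < b - w by omega)]
    apply List.map_congr_left; intro k _
    simp only [Function.comp_apply]; push_cast; ring
  · have h0 : PySem.Int.floordiv (b - 0 + w - 1) w = 1 :=
      (PySem.Int.floordiv_eq_iff_of_pos hw).2 ⟨by omega, by omega⟩
    rw [PySem.Int.floordiv_eq_ediv_of_pos hw] at h0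
    simp only [hb, if_pos, h0, show ¬ (0 < b - w) by omega, if_neg, not_false_iff]
    simp

lemma pvSlice_shift (s : List Int) {w j : Int} (hw : 0 < w) (hj : 0 ≤ j) :
    PySem.List.slice s (some (j + w)) (some (j + w + w)) =
    PySem.List.slice (s.drop w.toNat) (some j) (some (j + w)) := by
  rw [PySem.List.slice_toNat _ (by omega) (by omega),
      PySem.List.slice_toNat _ (by omega) (by omega), List.drop_drop]
  have h1 : (j + w + w).toNat - (j + w).toNat = (j + w).toNat - j.toNat := by omega
  have h2 : (j + w).toNat = w.toNat + j.toNat := by omega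
  rw [h1, h2]

-- A's loop body, named for the proofs
def pvStepA (s : List Int) (w : Int) : List Int → Int → List Int := fun acc i =>
  let window := PySem.List.slice s (some i) (some (i + w))
  match PySem.List.max? window (fun y => y), PySem.List.min? window (fun y => y) with
  | some mx, some mn => acc ++ window.map (fun t => if mx + mn ≤ 2 * t then (1 : Int) else 0)
  | _, _ => acc

lemma pvA_def (s : List Int) (w : Int) :
    autoThresholdBinarization s w =
      (PySem.List.pyRange 0 s.length w).foldl (pvStepA s w) [] := rfl

lemma pvWin_cons (x : Int) (xs : List Int) {w : Int} (hw : 0 < w) :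
    PySem.List.slice (x :: xs) (some 0) (some (0 + w)) = x :: xs.take (w.toNat - 1) := by
  obtain ⟨m, hm⟩ : ∃ m, w.toNat = m + 1 := ⟨w.toNat - 1, by omega⟩
  rw [zero_add, PySem.List.slice_zero_start, PySem.List.slice_to _ (le_of_lt hw)]
  simp [hm, List.take_succ_cons]

lemma pvRange_len_fix {w : Int} (hw : 0 < w) (s : List Int) :
    PySem.List.pyRange 0 ((s.length : Int) - w) w =
    PySem.List.pyRange 0 ((s.drop w.toNat).length : Int) w := by
  by_cases h : w < (s.length : Int)
  · congr 1; simp [List.length_drop]; omega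
  · rw [pvRange_nil hw (by omega), pvRange_nil hw (by simp [List.length_drop]; omega)]

lemma pvA_loop {w : Int} (hw : 0 < w) :
    ∀ (N : Nat) (s : List Int), s.length ≤ N → ∀ acc : List Int,
    (PySem.List.pyRange 0 s.length w).foldl (pvStepA s w) acc =
      acc ++ pvRef (w.toNat - 1) s := by
  intro N
  induction N with
  | zero =>
    intro s hs acc
    have hnil : s = [] := List.length_eq_zero_iff.mp (by omega)
    subst hnil
    rw [show ((List.length ([] : List Int) : Int)) = 0 by simp, pvRange_nil hw le_rfl]
    simp [pvRef]
  | succ N ih =>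
    intro s hs acc
    match s with
    | [] =>
      rw [show ((List.length ([] : List Int) : Int)) = 0 by simp, pvRange_nil hw le_rfl]
      simp [pvRef]
    | x :: xs =>
      have hn : (0 : Int) < ((x :: xs).length : Int) := by simp
      rw [pvRange_peel hw hn, List.foldl_cons, List.foldl_map]
      -- the first window
      have hstep : pvStepA (x :: xs) w acc 0 =
          acc ++ (match PySem.List.max? (x :: xs.take (w.toNat - 1)) (fun y => y),
                        PySem.List.min? (x :: xs.take (w.toNat - 1)) (fun y => y) with
                  | some mx, some mn =>
                      (x :: xs.take (w.toNat - 1)).map (fun t => if mx + mn ≤ 2 * t then (1 : Int) else 0)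
                  | _, _ => []) := by
        simp only [pvStepA]
        rw [pvWin_cons x xs hw, PySem.List.max?_id_cons, PySem.List.min?_id_cons]
      rw [hstep]
      -- the remaining windows act on the dropped list
      have hrest : ∀ (a : List Int), ∀ j ∈ PySem.List.pyRange 0 (((x :: xs).length : Int) - w) w,
          pvStepA (x :: xs) w a (j + w) = pvStepA ((x :: xs).drop w.toNat) w a j := by
        intro a j hj
        have hj0 : 0 ≤ j := ((PySem.List.mem_pyRange_iff_of_pos hw j).mp hj).1
        simp only [pvStepA]
        rw [pvSlice_shift _ hw hj0]
      rw [PySem.List.foldl_congr_mem _ _ _ _ hrest, pvRange_len_fix hw,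
          ih _ (by rw [List.length_drop]; simp only [List.length_cons] at hs ⊢; omega)]
      have htk : (x :: xs).take ((w.toNat - 1) + 1) = x :: xs.take (w.toNat - 1) := by
        rw [List.take_succ_cons]
      have hdr : (x :: xs).drop ((w.toNat - 1) + 1) = xs.drop (w.toNat - 1) := by
        rw [List.drop_succ_cons]
      have hD : (x :: xs).drop w.toNat = xs.drop (w.toNat - 1) := by
        obtain ⟨m, hm⟩ : ∃ m, w.toNat = m + 1 := ⟨w.toNat - 1, by omega⟩
        simp [hm]
      rw [hD]
      conv_rhs => rw [pvRef]
      rw [htk, hdr, List.append_assoc]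

-- B's two passes, named for the proofs
def pvT (s : List Int) (w : Int) : List Int :=
  (PySem.List.pyRange 0 s.length w).map
    (fun i => pvThresh2 (PySem.List.slice s (some i) (some (i + w))))

def pvPass (T : List Int) (w : Int) (l : List Int) (m : Int) : List Int :=
  (PySem.List.enumerate l m).map (fun p =>
    if PySem.List.pyGetD T (PySem.Int.floordiv p.1 w) 0 ≤ 2 * p.2 then (1 : Int) else 0)

lemma pvB_def (s : List Int) (w : Int) :
    autoThresholdBinarization_alt s w = pvPass (pvT s w) w s 0 := rfl

lemma pvT_peel {w : Int} (hw : 0 < w) (x : Int) (xs : List Int) :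
    pvT (x :: xs) w =
      pvThresh2 (x :: xs.take (w.toNat - 1)) :: pvT ((x :: xs).drop w.toNat) w := by
  unfold pvT
  rw [pvRange_peel hw (by simp), List.map_cons, List.map_map, pvWin_cons x xs hw]
  congr 1
  rw [List.map_congr_left (fun j hj => by
        have hj0 : 0 ≤ j := ((PySem.List.mem_pyRange_iff_of_pos hw j).mp hj).1
        show pvThresh2 (PySem.List.slice (x :: xs) (some (j + w)) (some (j + w + w))) =
          pvThresh2 (PySem.List.slice ((x :: xs).drop w.toNat) (some j) (some (j + w)))
        rw [pvSlice_shift _ hw hj0]),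
      pvRange_len_fix hw]

lemma pvPass_nil (T : List Int) (w m : Int) : pvPass T w [] m = [] := by
  simp [pvPass, PySem.List.enumerate]

lemma pvPass_first {w : Int} (hw : 0 < w) (t0 : Int) (T' : List Int) :
    ∀ (l : List Int) (m : Int), 0 ≤ m → m + (l.length : Int) ≤ w →
    pvPass (t0 :: T') w l m = l.map (fun v => if t0 ≤ 2 * v then (1 : Int) else 0) := by
  intro l
  induction l with
  | nil => intro m _ _; exact pvPass_nil _ _ _
  | cons v t ihl =>
    intro m hm0 hmw
    unfold pvPass
    rw [PySem.List.enumerate_cons, List.map_cons, List.map_cons]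
    have hlen : m + (t.length : Int) + 1 ≤ w := by
      simp only [List.length_cons] at hmw; push_cast at hmw ⊢; omega
    have hq : PySem.Int.floordiv m w = 0 := by
      rw [PySem.Int.floordiv_eq_iff_of_pos hw]
      refine ⟨?_, ?_⟩ <;> norm_num <;> omega
    rw [hq, PySem.List.pyGetD_of_nonneg _ _ le_rfl]
    have := ihl (m + 1) (by omega) (by omega)
    unfold pvPass at this
    rw [this]
    rfl

lemma pvPass_shift {w : Int} (hw : 0 < w) (t0 : Int) (T' : List Int) :
    ∀ (l : List Int) (j : Int), 0 ≤ j →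
    pvPass (t0 :: T') w l (w + j) = pvPass T' w l j := by
  intro l
  induction l with
  | nil => intro j _; rw [pvPass_nil, pvPass_nil]
  | cons v t ihl =>
    intro j hj
    unfold pvPass
    rw [PySem.List.enumerate_cons, PySem.List.enumerate_cons, List.map_cons, List.map_cons]
    have hq0 : 0 ≤ PySem.Int.floordiv j w := by
      rw [PySem.Int.floordiv_eq_ediv_of_pos hw]; exact Int.ediv_nonneg hj (by omega)
    have hdiv : PySem.Int.floordiv (w + j) w = PySem.Int.floordiv j w + 1 := by
      rw [PySem.Int.floordiv_eq_ediv_of_pos hw, PySem.Int.floordiv_eq_ediv_of_pos hw,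
          show w + j = j + 1 * w by ring, Int.add_mul_ediv_right _ _ (by omega)]
    have hget : PySem.List.pyGetD (t0 :: T') (PySem.Int.floordiv j w + 1) 0 =
        PySem.List.pyGetD T' (PySem.Int.floordiv j w) 0 := by
      rw [PySem.List.pyGetD_of_nonneg _ _ (by omega), PySem.List.pyGetD_of_nonneg _ _ hq0,
          show (PySem.Int.floordiv j w + 1).toNat = (PySem.Int.floordiv j w).toNat + 1 by omega]
      rfl
    rw [hdiv, hget, show w + j + 1 = w + (j + 1) by ring]
    have := ihl (j + 1) (by omega)
    unfold pvPass at this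
    rw [this]

lemma pvB_loop {w : Int} (hw : 0 < w) :
    ∀ (N : Nat) (s : List Int), s.length ≤ N →
    pvPass (pvT s w) w s 0 = pvRef (w.toNat - 1) s := by
  intro N
  induction N with
  | zero =>
    intro s hs
    have hnil : s = [] := List.length_eq_zero_iff.mp (by omega)
    subst hnil
    rw [pvPass_nil]; simp [pvRef]
  | succ N ih =>
    intro s hs
    match s with
    | [] => rw [pvPass_nil]; simp [pvRef]
    | x :: xs =>
      have hw1 : 1 ≤ w.toNat := by omega
      rw [pvT_peel hw x xs]
      set win : List Int := x :: xs.take (w.toNat - 1) with hwin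
      set t0 : Int := pvThresh2 win with ht0
      set s' : List Int := (x :: xs).drop w.toNat with hs'
      have hsplit : x :: xs = win ++ s' := by
        rw [hwin, hs']
        obtain ⟨m, hm⟩ : ∃ m, w.toNat = m + 1 := ⟨w.toNat - 1, by omega⟩
        simp [hm]
      have hwl : (win.length : Int) ≤ w := by
        rw [hwin]; simp only [List.length_cons, List.length_take]; push_cast; omega
      conv_lhs => rw [show pvPass (t0 :: pvT s' w) w (x :: xs) 0 =
        pvPass (t0 :: pvT s' w) w (win ++ s') 0 by rw [← hsplit]]
      have happ : pvPass (t0 :: pvT s' w) w (win ++ s') 0 =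
          pvPass (t0 :: pvT s' w) w win 0 ++ pvPass (t0 :: pvT s' w) w s' (win.length : Int) := by
        unfold pvPass
        rw [PySem.List.enumerate_append, List.map_append, zero_add]
      rw [happ, pvPass_first hw t0 _ win 0 le_rfl (by omega)]
      -- the tail: either the window covers everything (s' = []) or win.length = w
      have htail : pvPass (t0 :: pvT s' w) w s' (win.length : Int) = pvRef (w.toNat - 1) s' := by
        by_cases hcase : xs.length ≤ w.toNat - 1
        · have : s' = [] := by
            rw [hs']; apply List.drop_eq_nil_of_le; simp only [List.length_cons]; omega
          rw [this, pvPass_nil]; simp [pvRef]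
        · have hwinl : (win.length : Int) = w + 0 := by
            rw [hwin]; simp only [List.length_cons, List.length_take]; push_cast; omega
          rw [hwinl, pvPass_shift hw t0 _ s' 0 le_rfl]
          exact ih s' (by rw [hs', List.length_drop]; simp only [List.length_cons] at hs ⊢; omega)
      rw [htail]
      -- fold back into pvRef
      conv_rhs => rw [pvRef]
      have htk : (x :: xs).take ((w.toNat - 1) + 1) = win := by
        rw [hwin, List.take_succ_cons]
      have hdr : (x :: xs).drop ((w.toNat - 1) + 1) = s' := by
        rw [hs', List.drop_succ_cons]
        obtain ⟨m, hm⟩ : ∃ m, w.toNat = m + 1 := ⟨w.toNat - 1, by omega⟩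
        simp [hm]
      rw [htk, hdr]
      congr 1
      rw [hwin, PySem.List.max?_id_cons, PySem.List.min?_id_cons]
      simp [ht0, hwin, pvThresh2, PySem.List.max?_id_cons, PySem.List.min?_id_cons]

theorem autoThresholdBinarization_spec : Claim_equal_autoThresholdBinarization := by
  intro samples windowSize _ hpre
  unfold Spec_autoThresholdBinarization
  have hw : 0 < windowSize := hpre
  rw [pvA_def, pvA_loop hw samples.length samples le_rfl [], List.nil_append,
      pvB_def, pvB_loop hw samples.length samples le_rfl]
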